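-- pv_equiv track=rewrite | github.com/Style3D/StyleXD | stylexd_utils/file_helper.py | split_dict
-- ===== SOURCE A (Python) =====
-- def split_dict(d: dict, n: int) -> list[dict]:
--     if n <= 0:
--         raise ValueError("[WARNING]Number of parts should be greater than 0.")
--
--     keys = list(d.keys())
--     avg_size = len(keys) // n
--     parts = []
--
--     for i in range(n):
--         start_idx = i * avg_size
--         if i == n - 1:  # For the last part, include any remaining items
--             end_idx = len(keys)
--         else:
--             end_idx = start_idx + avg_size
--         part = {k: d[k] for k in keys[start_idx:end_idx]}
--         parts.append(part)
--
--     return parts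
-- ===== SOURCE B (Python) =====
-- def split_dict(d: dict, n: int) -> list[dict]:
--     if n <= 0:
--         raise ValueError("[WARNING]Number of parts should be greater than 0.")
--     parts = [{} for _ in range(n)]
--     avg_size = len(d) // n
--     for idx, (k, v) in enumerate(d.items()):
--         j = n - 1 if avg_size == 0 else min(idx // avg_size, n - 1)
--         parts[j][k] = v
--     return parts
-- ===== Notes on version B (the rewrite author's own statement) =====
-- stated objective: alternative
-- what changed: B preallocates the n empty parts and distributes the items in one flat pass over d.items() with a capped bucket index min(idx//avg, n-1) (everything to the last part when avg==0), instead of computing per-part slice boundaries and building n separate dict comprehensions over key slices.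
import Mathlib
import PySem

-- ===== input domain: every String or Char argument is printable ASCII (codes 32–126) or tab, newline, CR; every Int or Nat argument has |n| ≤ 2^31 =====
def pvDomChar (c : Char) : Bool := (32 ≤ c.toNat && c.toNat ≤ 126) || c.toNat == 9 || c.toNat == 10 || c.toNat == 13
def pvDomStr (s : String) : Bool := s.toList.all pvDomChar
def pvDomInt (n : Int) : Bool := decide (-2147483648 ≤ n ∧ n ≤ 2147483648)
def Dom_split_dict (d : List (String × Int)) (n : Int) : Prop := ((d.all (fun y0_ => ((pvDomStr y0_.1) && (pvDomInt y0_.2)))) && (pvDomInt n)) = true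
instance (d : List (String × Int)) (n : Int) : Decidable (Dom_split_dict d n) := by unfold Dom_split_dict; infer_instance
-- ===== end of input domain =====

-- B distributes items in one flat pass with a capped bucket index instead of per-part key-slice comprehensions (alternative decomposition, same cost).


-- ===== PORT A =====
-- 'd[k]' is ported with getD: every looked-up k comes from keys = list(d.keys()), so KeyError is unreachable.
def split_dict (d : List (String × Int)) (n : Int) : List (List (String × Int)) :=
  if n ≤ 0 then []  -- Python raises ValueError here; excluded by Pre_split_dict
  else
    let keys := PySem.Dict.keys (PySem.Dict.mk d)
    let avg_size := PySem.Int.floordiv (PySem.List.len keys) n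
    (PySem.List.pyRange 0 n 1).foldl (fun parts i =>
      let start_idx := i * avg_size
      let end_idx := if i = n - 1 then PySem.List.len keys else start_idx + avg_size
      let part := (PySem.List.slice keys (some start_idx) (some end_idx)).foldl
        (fun p k => PySem.Dict.insert p k (PySem.Dict.getD (PySem.Dict.mk d) k 0)) PySem.Dict.empty
      parts ++ [part.items]) []

-- ===== PORT B =====
def split_dict_alt (d : List (String × Int)) (n : Int) : List (List (String × Int)) :=
  if n ≤ 0 then []  -- Python raises ValueError here; excluded by Pre_split_dict
  else
    let avg_size := PySem.Int.floordiv (PySem.List.len d) n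
    let init := (PySem.List.pyRange 0 n 1).map (fun _ => (PySem.Dict.empty : PySem.Dict String Int))
    let final := (PySem.List.enumerate d).foldl (fun parts p =>
      let j := if avg_size = 0 then n - 1 else min (PySem.Int.floordiv p.1 avg_size) (n - 1)
      PySem.List.pySetD parts j (PySem.Dict.insert (PySem.List.pyGetD parts j PySem.Dict.empty) p.2.1 p.2.2)) init
    final.map PySem.Dict.items

-- ===== PRECONDITION & SPEC =====
-- Pre_ excludes n ≤ 0, where the Python raises ValueError, and association lists with duplicate keys,
-- which do not represent a Python dict (d is a dict, so its keys are distinct).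
def Pre_split_dict (d : List (String × Int)) (n : Int) : Prop :=
  1 ≤ n ∧ (d.map Prod.fst).Nodup
instance (d : List (String × Int)) (n : Int) : Decidable (Pre_split_dict d n) := by unfold Pre_split_dict; infer_instance
def pvWitness_split_dict : (List (String × Int)) × Int := ([("a", 1), ("b", 2), ("c", 3)], 2)

def Spec_split_dict (d : List (String × Int)) (n : Int) (out : List (List (String × Int))) : Prop := out = split_dict_alt d n
instance (d : List (String × Int)) (n : Int) (out : List (List (String × Int))) : Decidable (Spec_split_dict d n out) := by unfold Spec_split_dict; infer_instance

-- ===== CLAIM (what is proved, stated in full; the proofs are below) =====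
def Claim_equal_split_dict : Prop := ∀ (d : List (String × Int)) (n : Int), Dom_split_dict d n → Pre_split_dict d n → Spec_split_dict d n (split_dict d n)

-- ===== LEMMAS AND PROOFS =====

-- the bucket index B assigns to item number idx
def pvBucket (len n idx : Int) : Int :=
  if PySem.Int.floordiv len n = 0 then n - 1 else min (PySem.Int.floordiv idx (PySem.Int.floordiv len n)) (n - 1)

-- A's part i, characterised as a contiguous slice of the items list
def pvSeg (d : List (String × Int)) (n i : Int) : List (String × Int) :=
  let avg := PySem.Int.floordiv (d.length : Int) n
  PySem.List.slice d (some (i * avg)) (some (if i = n - 1 then (d.length : Int) else i * avg + avg))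

theorem pvSliceSub {α : Type} (d : List α) (a b : Int) (ha : 0 ≤ a) (hb : 0 ≤ b) :
    List.Sublist (PySem.List.slice d (some a) (some b)) d := by
  rw [PySem.List.slice_toNat d ha hb]
  exact (List.take_sublist _ _).trans (List.drop_sublist _ _)

theorem pvSliceMap {α β : Type} (d : List α) (f : α → β) (a b : Int) (ha : 0 ≤ a) (hb : 0 ≤ b) :
    PySem.List.slice (d.map f) (some a) (some b) = (PySem.List.slice d (some a) (some b)).map f := by
  rw [PySem.List.slice_toNat _ ha hb, PySem.List.slice_toNat d ha hb, List.map_take, List.map_drop]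

theorem pvA_char (d : List (String × Int)) (n : Int) (hn : 1 ≤ n)
    (hnd : (d.map Prod.fst).Nodup) :
    split_dict d n = (PySem.List.pyRange 0 n 1).map (fun i => pvSeg d n i) := by
  unfold split_dict
  rw [if_neg (by omega)]
  simp only [PySem.Dict.keys_mk, PySem.List.len_eq, List.length_map,
    PySem.List.foldl_append_singleton_eq_map, List.nil_append]
  apply List.map_congr_left
  intro i hi
  obtain ⟨hi0, hin⟩ := (PySem.List.mem_pyRange_one).mp hi
  have havg : 0 ≤ PySem.Int.floordiv (d.length : Int) n := by
    rw [PySem.Int.floordiv_eq_ediv_of_pos (by omega)]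
    exact Int.ediv_nonneg (by positivity) (by omega)
  set avg := PySem.Int.floordiv (d.length : Int) n with hav
  have ha : 0 ≤ i * avg := by positivity
  have hb : 0 ≤ (if i = n - 1 then (d.length : Int) else i * avg + avg) := by
    split <;> [positivity; positivity]
  rw [pvSliceMap d Prod.fst _ _ ha hb, List.foldl_map]
  rw [PySem.Dict.items_foldl_insert_fresh _ _ _ _ (by intro p _; rfl)
      (((pvSliceSub d _ _ ha hb).map Prod.fst).nodup hnd)]
  have : ∀ p ∈ PySem.List.slice d (some (i * avg)) (some (if i = n - 1 then (d.length : Int) else i * avg + avg)),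
      (p.1, PySem.Dict.getD (PySem.Dict.mk d) p.1 0) = p := by
    intro p hp
    have hpd : p ∈ d := PySem.List.mem_of_mem_slice d _ _ hp
    have : PySem.Dict.getD (PySem.Dict.mk d) p.1 0 = p.2 := by
      apply PySem.Dict.getD_of_mem_items (PySem.Dict.mk d) (k := p.1) (v := p.2)
      · simpa using hpd
      · simpa using hnd
    simp [this]
  rw [List.map_congr_left this]
  simp [pvSeg, ← hav, PySem.Dict.empty]

theorem pvFiltSlice {α : Type} (d : List α) (s : Nat) (a b : Int) :
    ((PySem.List.enumerate d (s : Int)).filter (fun p => decide (a ≤ p.1 ∧ p.1 < b))).map (fun p => p.2)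
      = (d.take (b - s).toNat).drop (a - s).toNat := by
  induction d generalizing s with
  | nil => simp [PySem.List.enumerate_nil]
  | cons x xs ih =>
    rw [PySem.List.enumerate_cons]
    have h1 : ((s : Int) + 1) = ((s + 1 : Nat) : Int) := by push_cast; ring
    by_cases hb : b - s ≤ 0
    · have hc : ¬ (a ≤ (s:Int) ∧ (s:Int) < b) := by omega
      simp only [List.filter_cons]
      rw [if_neg (by simpa using hc), h1, ih]
      rw [show (b - (s:Int)).toNat = 0 by omega, show (b - ((s+1:Nat):Int)).toNat = 0 by push_cast; omega]
      simp
    · have htake : (b - (s:Int)).toNat = (b - ((s+1:Nat):Int)).toNat + 1 := by push_cast; omega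
      by_cases ha : a ≤ (s:Int)
      · have hc : (a ≤ (s:Int) ∧ (s:Int) < b) := by omega
        simp only [List.filter_cons]
        rw [if_pos (by simpa using hc), List.map_cons, h1, ih]
        rw [show (a - (s:Int)).toNat = 0 by omega, show (a - ((s+1:Nat):Int)).toNat = 0 by push_cast; omega,
            htake, List.take_succ_cons, List.drop_zero, List.drop_zero]
      · have hc : ¬ (a ≤ (s:Int) ∧ (s:Int) < b) := by omega
        simp only [List.filter_cons]
        rw [if_neg (by simpa using hc), h1, ih]
        rw [show (a - (s:Int)).toNat = (a - ((s+1:Nat):Int)).toNat + 1 by push_cast; omega,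
            htake, List.take_succ_cons, List.drop_succ_cons]

theorem pvScatter (jf : Int → Int) (l : List (Int × String × Int))
    (parts : List (PySem.Dict String Int))
    (hj : ∀ p ∈ l, 0 ≤ jf p.1 ∧ (jf p.1).toNat < parts.length)
    (hfresh : ∀ p ∈ l, ∀ q ∈ parts, q.contains p.2.1 = false)
    (hnd : (l.map (fun p => p.2.1)).Nodup) (t : Nat) :
    (l.foldl (fun ps p =>
        PySem.List.pySetD ps (jf p.1)
          (PySem.Dict.insert (PySem.List.pyGetD ps (jf p.1) PySem.Dict.empty) p.2.1 p.2.2)) parts)[t]?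
      = (parts[t]?).map (fun q =>
          PySem.Dict.mk (q.items ++ (l.filter (fun p => decide (jf p.1 = (t : Int)))).map (fun p => p.2))) := by
  induction l generalizing parts with
  | nil =>
    simp
  | cons p l ih =>
    obtain ⟨hj0, hjlt⟩ := hj p (List.mem_cons_self)
    simp only [List.foldl_cons]
    set jn := (jf p.1).toNat with hjn
    have hjcast : jf p.1 = (jn : Int) := by omega
    have hget : PySem.List.pyGetD parts (jf p.1) PySem.Dict.empty = parts[jn] := by
      rw [PySem.List.pyGetD_eq_getElem _ _ hj0 (by omega)]
    have hset : PySem.List.pySetD parts (jf p.1)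
        (PySem.Dict.insert (PySem.List.pyGetD parts (jf p.1) PySem.Dict.empty) p.2.1 p.2.2)
        = parts.set jn ((parts[jn]).insert p.2.1 p.2.2) := by
      rw [PySem.List.pySetD_of_nonneg _ _ hj0, hget]
    rw [hset]
    have hfr : (parts[jn]).contains p.2.1 = false :=
      hfresh p List.mem_cons_self _ (List.getElem_mem hjlt)
    have hkey : p.2.1 ∉ l.map (fun q => q.2.1) := by
      simpa using (List.nodup_cons.mp hnd).1
    rw [ih]
    · -- index-wise case split
      rw [List.getElem?_set]
      by_cases het : jn = t
      · subst het
        rw [if_pos rfl, if_pos hjlt]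
        rw [List.getElem?_eq_getElem hjlt]
        simp only [Option.map_some]
        congr 1
        apply PySem.Dict.ext
        simp only
        rw [PySem.Dict.items_insert_of_not_contains _ _ hfr]
        rw [List.filter_cons, if_pos (by simp [hjcast])]
        simp
      · rw [if_neg het]
        rw [List.filter_cons, if_neg (by simp [hjcast]; omega)]
    · -- hj for the tail
      intro q hq
      have := hj q (List.mem_cons_of_mem _ hq)
      simpa using this
    · -- freshness for the tail
      intro q hq r hr
      rcases List.mem_or_eq_of_mem_set hr with hr' | hr'
      · exact hfresh q (List.mem_cons_of_mem _ hq) r hr'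
      · subst hr'
        rw [PySem.Dict.contains_insert]
        have hne : q.2.1 ≠ p.2.1 := by
          intro h; exact hkey (by simpa [← h] using List.mem_map_of_mem (f := fun z => z.2.1) hq)
        rw [hfresh q (List.mem_cons_of_mem _ hq) _ (List.getElem_mem hjlt)]
        simp [hne]
    · exact (List.nodup_cons.mp hnd).2

theorem pvBucket_iff (len n idx t : Int) (hn : 1 ≤ n) (ht0 : 0 ≤ t) (htn : t < n)
    (hidx : 0 ≤ idx ∧ idx < len) :
    pvBucket len n idx = t ↔
      t * PySem.Int.floordiv len n ≤ idx ∧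
      idx < (if t = n - 1 then len else t * PySem.Int.floordiv len n + PySem.Int.floordiv len n) := by
  unfold pvBucket
  set avg := PySem.Int.floordiv len n with hav
  by_cases h0 : avg = 0
  · rw [if_pos h0, h0]
    by_cases ht : t = n - 1 <;> simp [ht] <;> omega
  · have havg : 0 < avg := by
      have : 0 ≤ avg := by
        rw [hav, PySem.Int.floordiv_eq_ediv_of_pos (by omega)]
        exact Int.ediv_nonneg (by omega) (by omega)
      omega
    rw [if_neg h0]
    set q := PySem.Int.floordiv idx avg with hq
    have hA : t ≤ q ↔ t * avg ≤ idx := PySem.Int.le_floordiv_iff_mul_le havg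
    have hB : q < t + 1 ↔ idx < (t + 1) * avg := PySem.Int.floordiv_lt_iff_lt_mul havg
    have hC : n - 1 ≤ q ↔ (n - 1) * avg ≤ idx := PySem.Int.le_floordiv_iff_mul_le havg
    have hE : (t + 1) * avg = t * avg + avg := by ring
    have hq0 : 0 ≤ q := by
      rw [hq, PySem.Int.floordiv_eq_ediv_of_pos havg]
      exact Int.ediv_nonneg hidx.1 (by omega)
    by_cases ht : t = n - 1
    · rw [if_pos ht, ht]
      subst ht
      set X := (n-1) * avg with hX
      omega
    · rw [if_neg ht]
      set X := t * avg with hX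
      set Y := (t+1) * avg with hY
      omega

theorem pvB_char (d : List (String × Int)) (n : Int) (hn : 1 ≤ n)
    (hnd : (d.map Prod.fst).Nodup) :
    split_dict_alt d n = (PySem.List.pyRange 0 n 1).map (fun t =>
      ((PySem.List.enumerate d).filter (fun p => decide (pvBucket (d.length : Int) n p.1 = t))).map (fun p => p.2)) := by
  unfold split_dict_alt
  rw [if_neg (by omega)]
  simp only [PySem.List.len_eq]
  set avg := PySem.Int.floordiv (d.length : Int) n with hav
  set init := (PySem.List.pyRange 0 n 1).map (fun _ => (PySem.Dict.empty : PySem.Dict String Int)) with hinit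
  have hlen : init.length = (n - 0).toNat := by
    simp [hinit, PySem.List.length_pyRange_one]
  have hjf : ∀ i : Int, (if avg = 0 then n - 1 else min (PySem.Int.floordiv i avg) (n - 1)) = pvBucket (d.length : Int) n i := by
    intro i; rw [pvBucket, ← hav]
  have hstep : (fun (parts : List (PySem.Dict String Int)) (p : Int × String × Int) =>
      PySem.List.pySetD parts (if avg = 0 then n - 1 else min (PySem.Int.floordiv p.1 avg) (n - 1))
        (PySem.Dict.insert (PySem.List.pyGetD parts (if avg = 0 then n - 1 else min (PySem.Int.floordiv p.1 avg) (n - 1)) PySem.Dict.empty) p.2.1 p.2.2))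
      = (fun parts p =>
      PySem.List.pySetD parts (pvBucket (d.length : Int) n p.1)
        (PySem.Dict.insert (PySem.List.pyGetD parts (pvBucket (d.length : Int) n p.1) PySem.Dict.empty) p.2.1 p.2.2)) := by
    funext parts p; rw [hjf]
  rw [hstep]
  -- bucket bounds
  have hbnd : ∀ i : Int, 0 ≤ i → 0 ≤ pvBucket (d.length : Int) n i ∧ (pvBucket (d.length : Int) n i).toNat < init.length := by
    intro i hi
    have havg : 0 ≤ avg := by
      rw [hav, PySem.Int.floordiv_eq_ediv_of_pos (by omega)]
      exact Int.ediv_nonneg (by omega) (by omega)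
    have hfd : avg ≠ 0 → 0 ≤ PySem.Int.floordiv i avg := by
      intro h
      rw [PySem.Int.floordiv_eq_ediv_of_pos (by omega)]
      exact Int.ediv_nonneg hi (by omega)
    rw [hlen]
    unfold pvBucket
    rw [← hav]
    by_cases h0 : avg = 0
    · rw [if_pos h0]; omega
    · rw [if_neg h0]
      have := hfd h0
      omega
  apply List.ext_getElem?
  intro t
  rw [List.getElem?_map]
  rw [pvScatter (pvBucket (d.length : Int) n) (PySem.List.enumerate d) init
    (by
      intro p hp
      obtain ⟨k, hk, rfl⟩ := (PySem.List.mem_enumerate_iff d 0 p).mp hp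
      exact hbnd _ (by omega))
    (by
      intro p hp q hq
      have : q = PySem.Dict.empty := by
        simp only [hinit, List.mem_map] at hq
        obtain ⟨_, _, rfl⟩ := hq
        rfl
      rw [this, PySem.Dict.contains_empty])
    (by
      have : (PySem.List.enumerate d).map (fun p => p.2.1)
          = ((PySem.List.enumerate d).map (fun p => p.2)).map Prod.fst := by
        rw [List.map_map]; rfl
      rw [this, PySem.List.map_snd_enumerate]
      exact hnd)
    t]
  rw [List.getElem?_map]
  simp only [List.getElem?_map]
  by_cases ht : t < (PySem.List.pyRange 0 n 1).length
  · rw [List.getElem?_eq_getElem ht]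
    simp only [Option.map_some]
    rw [PySem.List.getElem_pyRange_one]
    simp [PySem.Dict.empty]
  · rw [List.getElem?_eq_none (by omega)]
    simp

theorem pvPart_eq (d : List (String × Int)) (n t : Int) (hn : 1 ≤ n) (ht0 : 0 ≤ t) (htn : t < n) :
    pvSeg d n t = ((PySem.List.enumerate d).filter
        (fun p => decide (pvBucket (d.length : Int) n p.1 = t))).map (fun p => p.2) := by
  have havg : 0 ≤ PySem.Int.floordiv (d.length : Int) n := by
    rw [PySem.Int.floordiv_eq_ediv_of_pos (by omega)]
    exact Int.ediv_nonneg (by omega) (by omega)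
  set avg := PySem.Int.floordiv (d.length : Int) n with hav
  set b := (if t = n - 1 then (d.length : Int) else t * avg + avg) with hb
  have hcong : ∀ p ∈ PySem.List.enumerate d,
      decide (pvBucket (d.length : Int) n p.1 = t) = decide (t * avg ≤ p.1 ∧ p.1 < b) := by
    intro p hp
    obtain ⟨k, hk, rfl⟩ := (PySem.List.mem_enumerate_iff d 0 p).mp hp
    have := pvBucket_iff (d.length : Int) n (0 + (k : Int)) t hn ht0 htn (by constructor <;> omega)
    rw [← hav, ← hb] at this
    simp only [decide_eq_decide]
    exact this
  rw [List.filter_congr hcong]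
  have h0 : ((0:Nat) : Int) = 0 := rfl
  have := pvFiltSlice d 0 (t * avg) b
  rw [h0] at this
  rw [this]
  have ha0 : 0 ≤ t * avg := by positivity
  have hb0 : 0 ≤ b := by rw [hb]; split <;> positivity
  rw [pvSeg]
  simp only [← hav, ← hb]
  rw [PySem.List.slice_toNat d ha0 hb0, List.drop_take]
  simp

theorem split_dict_spec : Claim_equal_split_dict := by
  intro d n _ hpre
  obtain ⟨hn, hnd⟩ := hpre
  unfold Spec_split_dict
  rw [pvA_char d n hn hnd, pvB_char d n hn hnd]
  apply List.map_congr_left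
  intro t ht
  obtain ⟨ht0, htn⟩ := (PySem.List.mem_pyRange_one).mp ht
  exact pvPart_eq d n t hn ht0 htn
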